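-- pv_equiv track=rewrite | github.com/ehatov216/MaToMa | backend/sonic_anatomy_bridge.py | _roman_to_semitone
-- ===== SOURCE A (Python) =====
-- from typing import Optional
--
-- ROMAN_DEGREE: dict[str, int] = {
--     "VII": 7, "VI": 6, "IV": 4, "V": 5, "III": 3, "II": 2, "I": 1,
-- }
--
-- def _roman_to_semitone(
--     roman_str: str, root_semi: int, intervals: list[int]
-- ) -> Optional[int]:
--     """
--     ローマ数字文字列（"IIImaj", "Vmin" など） → 絶対半音数。
--
--     長いローマ数字（VII, III, etc.）から順に試合してマッチさせる。
--     """
--     upper = roman_str.upper()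
--     for roman, degree in ROMAN_DEGREE.items():
--         if upper.startswith(roman):
--             return (root_semi + intervals[degree - 1]) % 12
--     return None
-- ===== SOURCE B (Python) =====
-- def _count_leading_i(s):
--     n = 0
--     for ch in s:
--         if ch != 'I':
--             break
--         n += 1
--     return n
--
-- def _roman_to_semitone(roman_str, root_semi, intervals):
--     u = roman_str.upper()
--     if not u:
--         return None
--     if u[0] == 'V':
--         degree = 5 + _count_leading_i(u[1:3])
--     elif u[0] == 'I':
--         if u[1:2] == 'V':
--             degree = 4
--         else:
--             degree = 1 + _count_leading_i(u[1:3])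
--     else:
--         return None
--     return (root_semi + intervals[degree - 1]) % 12
-- ===== Notes on version B (the rewrite author's own statement) =====
-- stated objective: alternative
-- what changed: Drops the ROMAN_DEGREE table entirely: B computes the degree arithmetically by parsing the prefix character-by-character (leading 'V' gives 5 plus a capped count of following 'I's; leading 'I' gives 4 if followed by 'V', else a capped count of leading 'I's), instead of A's linear scan testing startswith against seven table keys.
import Mathlib
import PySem

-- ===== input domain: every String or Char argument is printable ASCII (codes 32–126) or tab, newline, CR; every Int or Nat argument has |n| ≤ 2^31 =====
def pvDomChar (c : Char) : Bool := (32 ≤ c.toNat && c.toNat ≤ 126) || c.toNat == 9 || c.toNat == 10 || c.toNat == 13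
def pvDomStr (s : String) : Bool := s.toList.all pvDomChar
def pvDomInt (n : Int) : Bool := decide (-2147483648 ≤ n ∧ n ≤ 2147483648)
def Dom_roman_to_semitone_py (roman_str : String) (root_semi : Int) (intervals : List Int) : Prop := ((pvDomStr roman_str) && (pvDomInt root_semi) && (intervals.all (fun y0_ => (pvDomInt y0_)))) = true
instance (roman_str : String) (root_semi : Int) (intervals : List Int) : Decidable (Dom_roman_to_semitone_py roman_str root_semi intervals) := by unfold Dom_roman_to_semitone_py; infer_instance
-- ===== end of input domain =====

-- B drops A's ROMAN_DEGREE table and its startswith scan: it parses the Roman prefix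
-- arithmetically by counting characters; objective: alternative (table-free parser).

-- ===== PORT A =====
-- ROMAN_DEGREE in its Python insertion order
def romanDegreeA : List (String × Int) :=
  [("VII", 7), ("VI", 6), ("IV", 4), ("V", 5), ("III", 3), ("II", 2), ("I", 1)]

-- A's for-loop: the first key `upper` starts with wins; pyGet? = none is intervals[degree-1]
-- raising IndexError, which Pre_ excludes
def goA (l : List (String × Int)) (u : String) (root_semi : Int) (intervals : List Int) : Option Int :=
  match l with
  | [] => none
  | (roman, degree) :: rest =>
    if PySem.Str.startswith u roman then
      (PySem.List.pyGet? intervals (degree - 1)).map (fun x => PySem.Int.mod (root_semi + x) 12)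
    else goA rest u root_semi intervals

def roman_to_semitone_py (roman_str : String) (root_semi : Int) (intervals : List Int) : Option Int :=
  goA romanDegreeA (PySem.Str.upper roman_str) root_semi intervals

-- ===== PORT B =====
-- _count_leading_i: count leading 'I' characters (the for-loop with break)
def countLeadingI (l : List Char) : Int :=
  match l with
  | [] => 0
  | c :: rest => if c ≠ 'I' then 0 else 1 + countLeadingI rest

-- Source B's slices u[1:3] / u[1:2] have fixed non-negative bounds, so drop/take is exact here
def roman_to_semitone_py_alt (roman_str : String) (root_semi : Int) (intervals : List Int) : Option Int :=
  let u := (PySem.Str.upper roman_str).toList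
  match u with
  | [] => none
  | c :: rest =>
    if c = 'V' then
      let degree := 5 + countLeadingI (rest.take 2)
      (PySem.List.pyGet? intervals (degree - 1)).map (fun x => PySem.Int.mod (root_semi + x) 12)
    else if c = 'I' then
      if rest.take 1 = ['V'] then
        (PySem.List.pyGet? intervals (4 - 1)).map (fun x => PySem.Int.mod (root_semi + x) 12)
      else
        let degree := 1 + countLeadingI (rest.take 2)
        (PySem.List.pyGet? intervals (degree - 1)).map (fun x => PySem.Int.mod (root_semi + x) 12)
    else none

-- ===== PRECONDITION & SPEC =====
-- Pre_ excludes exactly the inputs where A (and likewise B) raises IndexError: a Roman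
-- numeral prefix matches but `intervals` is shorter than that numeral's degree.
def Pre_roman_to_semitone_py (roman_str : String) (root_semi : Int) (intervals : List Int) : Prop :=
  (PySem.Str.startswith (PySem.Str.upper roman_str) "VII" = true → 7 ≤ intervals.length) ∧
  (PySem.Str.startswith (PySem.Str.upper roman_str) "VI" = true → 6 ≤ intervals.length) ∧
  (PySem.Str.startswith (PySem.Str.upper roman_str) "IV" = true → 4 ≤ intervals.length) ∧
  (PySem.Str.startswith (PySem.Str.upper roman_str) "V" = true → 5 ≤ intervals.length) ∧
  (PySem.Str.startswith (PySem.Str.upper roman_str) "III" = true → 3 ≤ intervals.length) ∧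
  (PySem.Str.startswith (PySem.Str.upper roman_str) "II" = true → 2 ≤ intervals.length) ∧
  (PySem.Str.startswith (PySem.Str.upper roman_str) "I" = true → 1 ≤ intervals.length)
instance (roman_str : String) (root_semi : Int) (intervals : List Int) : Decidable (Pre_roman_to_semitone_py roman_str root_semi intervals) := by unfold Pre_roman_to_semitone_py; infer_instance

def pvWitness_roman_to_semitone_py : String × Int × List Int := ("IIImaj", 4, [0, 2, 4, 5, 7, 9, 11])

def Spec_roman_to_semitone_py (roman_str : String) (root_semi : Int) (intervals : List Int) (out : Option Int) : Prop := out = roman_to_semitone_py_alt roman_str root_semi intervals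
instance (roman_str : String) (root_semi : Int) (intervals : List Int) (out : Option Int) : Decidable (Spec_roman_to_semitone_py roman_str root_semi intervals out) := by unfold Spec_roman_to_semitone_py; infer_instance

-- ===== CLAIM (what is proved, stated in full; the proofs are below) =====
def Claim_equal_roman_to_semitone_py : Prop := ∀ (roman_str : String) (root_semi : Int) (intervals : List Int), Dom_roman_to_semitone_py roman_str root_semi intervals → Pre_roman_to_semitone_py roman_str root_semi intervals → Spec_roman_to_semitone_py roman_str root_semi intervals (roman_to_semitone_py roman_str root_semi intervals)

-- ===== LEMMAS AND PROOFS =====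

-- helper to run the case analysis on the CHAR LIST of upper(s)
def altOnList (u : List Char) (root_semi : Int) (intervals : List Int) : Option Int :=
  match u with
  | [] => none
  | c :: rest =>
    if c = 'V' then
      (PySem.List.pyGet? intervals (5 + countLeadingI (rest.take 2) - 1)).map (fun x => PySem.Int.mod (root_semi + x) 12)
    else if c = 'I' then
      if rest.take 1 = ['V'] then
        (PySem.List.pyGet? intervals (4 - 1)).map (fun x => PySem.Int.mod (root_semi + x) 12)
      else
        (PySem.List.pyGet? intervals (1 + countLeadingI (rest.take 2) - 1)).map (fun x => PySem.Int.mod (root_semi + x) 12)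
    else none

theorem alt_eq_onList (s : String) (r : Int) (iv : List Int) :
    roman_to_semitone_py_alt s r iv = altOnList (PySem.Str.upper s).toList r iv := by
  unfold roman_to_semitone_py_alt altOnList
  rfl

-- both programs only look at the first three characters: equality holds unconditionally,
-- proved by case analysis on those characters (Pre_ only delimits the non-raising inputs).
set_option maxHeartbeats 1000000 in
theorem core_eq (l : List Char) (r : Int) (iv : List Int) :
    goA romanDegreeA (String.ofList l) r iv = altOnList l r iv := by
  match l with
  | [] =>
    simp [goA, romanDegreeA, altOnList, PySem.Chars.startswith, String.ext_iff]
  | [c1] =>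
    simp [goA, romanDegreeA, altOnList, PySem.Chars.startswith, countLeadingI]
    by_cases h1 : 'V' = c1 <;> by_cases h2 : 'I' = c1 <;> (try subst_vars) <;> simp_all [eq_comm]
  | [c1, c2] =>
    simp [goA, romanDegreeA, altOnList, PySem.Chars.startswith, countLeadingI]
    by_cases h1 : 'V' = c1 <;> by_cases h2 : 'I' = c1 <;> by_cases h3 : 'I' = c2 <;>
      by_cases h4 : 'V' = c2 <;> (try subst_vars) <;> simp_all [eq_comm]
  | c1 :: c2 :: c3 :: rest =>
    simp [goA, romanDegreeA, altOnList, PySem.Chars.startswith, countLeadingI]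
    by_cases h1 : 'V' = c1 <;> by_cases h2 : 'I' = c1 <;> by_cases h3 : 'I' = c2 <;>
      by_cases h4 : 'V' = c2 <;> by_cases h5 : 'I' = c3 <;> (try subst_vars) <;> simp_all [eq_comm]

-- ===== VERDICT (by name: the statement is the Claim_ definition above) =====
theorem roman_to_semitone_py_spec : Claim_equal_roman_to_semitone_py := by
  intro s r iv _ _
  unfold Spec_roman_to_semitone_py roman_to_semitone_py
  rw [alt_eq_onList]
  have h := core_eq (PySem.Str.upper s).toList r iv
  rwa [String.ofList_toList] at h
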